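-- pv_equiv track=rewrite | github.com/foxBMS/foxbms-2 | tests/axivion/rule_config_names.py | is_camel_case
-- ===== SOURCE A (Python) =====
-- def is_camel_case(name: str) -> bool:
--     """Checks whether a string is camelCase or not"""
--     # any valid camelCase word needs to start with an lowercase letter
--     if not name[0].lower() == name[0]:
--         return False
--
--     idx = []
--     for i, val in enumerate(name):
--         if val.isupper():
--             idx.append(i)
--
--     for i in range(1, len(idx)):
--         # if the difference between two indexes is 1, we are not seeing camelCase
--         if idx[i] - idx[i - 1] == 1:
--             return False
--
--     # if we come here, the name is camelCase
--     return True
-- ===== SOURCE B (Python) =====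
-- def is_camel_case(name: str) -> bool:
--     """Checks whether a string is camelCase or not"""
--     if not name[0].lower() == name[0]:
--         return False
--     prev_upper = False
--     for ch in name:
--         if ch.isupper():
--             if prev_upper:
--                 return False
--             prev_upper = True
--         else:
--             prev_upper = False
--     return True
-- ===== Notes on version B (the rewrite author's own statement) =====
-- stated objective: simpler
-- what changed: Replaces A's two-pass build-a-list-of-uppercase-indices-then-check-adjacent-differences with a single fused scan over the string keeping one boolean flag (was the previous char uppercase).
import Mathlib
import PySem

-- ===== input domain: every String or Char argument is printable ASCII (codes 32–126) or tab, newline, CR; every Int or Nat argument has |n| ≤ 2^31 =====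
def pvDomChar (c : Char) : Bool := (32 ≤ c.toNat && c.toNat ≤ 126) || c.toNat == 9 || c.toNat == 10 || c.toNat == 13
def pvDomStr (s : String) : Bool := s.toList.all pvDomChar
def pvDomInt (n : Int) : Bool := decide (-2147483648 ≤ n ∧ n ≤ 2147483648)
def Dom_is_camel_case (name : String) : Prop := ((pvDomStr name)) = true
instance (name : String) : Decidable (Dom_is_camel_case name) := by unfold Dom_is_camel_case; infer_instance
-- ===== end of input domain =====

-- B replaces A's two-pass index-list algorithm by a single scan with a boolean flag; return values agree on every non-empty string.

-- ===== PORT A =====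
-- literal port of A: first-char guard, then build idx (uppercase positions) with enumerate,
-- then scan range(1, len(idx)) checking adjacent differences (early return via && flag).
def is_camel_case (name : String) : Bool :=
  match PySem.Str.pyGet? name 0 with
  | none => false  -- name[0] raises IndexError in Python; excluded by Pre_
  | some c0 =>
    if !(PySem.Chars.lowerChar c0 == c0) then false
    else
      let idx : List Int := (PySem.List.enumerate name.toList 0).foldl
        (fun acc p => if PySem.Chars.isupper p.2 then acc ++ [p.1] else acc) []
      (PySem.List.pyRange 1 idx.length 1).foldl
        (fun ok i => ok && !(PySem.List.pyGetD idx i 0 - PySem.List.pyGetD idx (i - 1) 0 == 1)) true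

-- ===== PORT B =====
-- the single-pass loop of Source B: prev = was the previous char uppercase
def camelLoop : List Char → Bool → Bool
  | [], _ => true
  | c :: rest, prev =>
    if PySem.Chars.isupper c then
      if prev then false else camelLoop rest true
    else camelLoop rest false

def is_camel_case_alt (name : String) : Bool :=
  match PySem.Str.pyGet? name 0 with
  | none => false  -- name[0] raises IndexError in Python; excluded by Pre_
  | some c0 =>
    if !(PySem.Chars.lowerChar c0 == c0) then false
    else camelLoop name.toList false

-- ===== PRECONDITION & SPEC =====
-- Pre_ excludes only the empty string, on which A (and B) raise IndexError at name[0].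
def Pre_is_camel_case (name : String) : Prop := name ≠ ""
instance (name : String) : Decidable (Pre_is_camel_case name) := by unfold Pre_is_camel_case; infer_instance
def pvWitness_is_camel_case : String := "fooBar"
def Spec_is_camel_case (name : String) (out : Bool) : Prop := out = is_camel_case_alt name
instance (name : String) (out : Bool) : Decidable (Spec_is_camel_case name out) := by unfold Spec_is_camel_case; infer_instance

-- ===== CLAIM (what is proved, stated in full; the proofs are below) =====
def Claim_equal_is_camel_case : Prop := ∀ (name : String), Dom_is_camel_case name → Pre_is_camel_case name → Spec_is_camel_case name (is_camel_case name)

-- ===== LEMMAS AND PROOFS =====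

-- uppercase positions of l counted from offset s (what A's first loop builds)
def upIdx (s : Int) (l : List Char) : List Int :=
  ((PySem.List.enumerate l s).filter (fun p => PySem.Chars.isupper p.2)).map (·.1)

-- "no two adjacent uppercase characters" as a structural recursion
def noAdj : List Char → Bool
  | [] => true
  | [_] => true
  | a :: b :: r => !(PySem.Chars.isupper a && PySem.Chars.isupper b) && noAdj (b :: r)

def headUpper : List Char → Bool
  | [] => false
  | c :: _ => PySem.Chars.isupper c

lemma noAdj_cons_cons (a b : Char) (r : List Char) :
    noAdj (a :: b :: r) = (!(PySem.Chars.isupper a && PySem.Chars.isupper b) && noAdj (b :: r)) := rfl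

lemma upIdx_nil (s : Int) : upIdx s [] = [] := by
  simp [upIdx, PySem.List.enumerate_nil]

lemma upIdx_cons (s : Int) (c : Char) (l : List Char) :
    upIdx s (c :: l) =
      (if PySem.Chars.isupper c then [s] else []) ++ upIdx (s + 1) l := by
  rw [upIdx, PySem.List.enumerate_cons, List.filter_cons]
  cases h : PySem.Chars.isupper c <;> simp [upIdx]

lemma upIdx_ge (s : Int) (l : List Char) : ∀ x ∈ upIdx s l, s ≤ x := by
  induction l generalizing s with
  | nil => simp [upIdx_nil]
  | cons c r ih =>
    intro x hx
    rw [upIdx_cons] at hx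
    rcases List.mem_append.1 hx with h | h
    · split at h <;> simp_all
    · have := ih (s + 1) x h; omega

lemma camelLoop_eq (l : List Char) (prev : Bool) :
    camelLoop l prev = (!(prev && headUpper l) && noAdj l) := by
  induction l generalizing prev with
  | nil => cases prev <;> rfl
  | cons c r ih =>
    cases h : PySem.Chars.isupper c with
    | true =>
      cases prev with
      | true => simp [camelLoop, h, headUpper]
      | false =>
        rw [show camelLoop (c :: r) false = camelLoop r true from by simp [camelLoop, h], ih]
        cases r with
        | nil => simp [noAdj, headUpper]
        | cons d t => rw [noAdj_cons_cons]; simp [headUpper, h]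
    | false =>
      rw [show camelLoop (c :: r) prev = camelLoop r false from by simp [camelLoop, h], ih]
      cases r with
      | nil => simp [noAdj, headUpper, h]
      | cons d t => rw [noAdj_cons_cons]; simp [headUpper, h]

-- A's second loop, abstracted over the index list
def chk (xs : List Int) : Bool :=
  (PySem.List.pyRange 1 xs.length 1).foldl
    (fun ok i => ok && !(PySem.List.pyGetD xs i 0 - PySem.List.pyGetD xs (i - 1) 0 == 1)) true

lemma foldl_and_all {α : Type} (l : List α) (p : α → Bool) (b : Bool) :
    l.foldl (fun ok i => ok && p i) b = (b && l.all p) := by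
  induction l generalizing b with
  | nil => simp
  | cons x r ih => simp [List.foldl_cons, ih, Bool.and_assoc]

lemma chk_iff (xs : List Int) :
    chk xs = true ↔ List.IsChain (fun a b : Int => b - a ≠ 1) xs := by
  rw [chk, foldl_and_all, Bool.true_and, List.all_eq_true, List.isChain_iff_getElem]
  constructor
  · intro h i hi
    have hm : (((i + 1 : Nat) : Int)) ∈ PySem.List.pyRange 1 xs.length 1 := by
      rw [PySem.List.mem_pyRange_one]; push_cast; omega
    have := h _ hm
    have e1 : ((i + 1 : Nat) : Int) - 1 = ((i : Nat) : Int) := by push_cast; ring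
    rw [e1, PySem.List.pyGetD_natCast, PySem.List.pyGetD_natCast,
        List.getD_eq_getElem xs 0 hi,
        List.getD_eq_getElem xs 0 (show i < xs.length by omega)] at this
    simpa using this
  · intro h i hm
    rw [PySem.List.mem_pyRange_one] at hm
    obtain ⟨k, rfl⟩ : ∃ k : Nat, i = (k : Int) := ⟨i.toNat, by omega⟩
    have hk1 : 1 ≤ k := by exact_mod_cast hm.1
    have hk2 : k < xs.length := by exact_mod_cast hm.2
    obtain ⟨j, rfl⟩ : ∃ j : Nat, k = j + 1 := ⟨k - 1, by omega⟩
    have e1 : ((j + 1 : Nat) : Int) - 1 = ((j : Nat) : Int) := by push_cast; ring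
    rw [e1, PySem.List.pyGetD_natCast, PySem.List.pyGetD_natCast,
        List.getD_eq_getElem xs 0 hk2,
        List.getD_eq_getElem xs 0 (show j < xs.length by omega)]
    simpa using h j hk2

lemma upIdx_cons_true (s : Int) (c : Char) (l : List Char) (hc : PySem.Chars.isupper c = true) :
    upIdx s (c :: l) = s :: upIdx (s + 1) l := by
  simp [upIdx_cons, hc]

lemma upIdx_cons_false (s : Int) (c : Char) (l : List Char) (hc : PySem.Chars.isupper c = false) :
    upIdx s (c :: l) = upIdx (s + 1) l := by
  simp [upIdx_cons, hc]

lemma chain_upIdx (l : List Char) (s : Int) :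
    List.IsChain (fun a b : Int => b - a ≠ 1) (upIdx s l) ↔ noAdj l = true := by
  induction l generalizing s with
  | nil =>
    rw [upIdx_nil]
    exact ⟨fun _ => rfl, fun _ => List.isChain_nil⟩
  | cons c r ih =>
    cases hc : PySem.Chars.isupper c with
    | false =>
      rw [upIdx_cons_false s c r hc, ih]
      cases r with
      | nil => exact ⟨fun _ => rfl, fun _ => rfl⟩
      | cons d t => rw [noAdj_cons_cons]; simp [hc]
    | true =>
      rw [upIdx_cons_true s c r hc, List.isChain_cons, ih]
      cases r with
      | nil =>
        constructor
        · intro _; rfl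
        · intro _; exact ⟨by simp [upIdx_nil], rfl⟩
      | cons d t =>
        rw [noAdj_cons_cons]
        cases hd : PySem.Chars.isupper d with
        | true =>
          rw [upIdx_cons_true (s + 1) d t hd]
          constructor
          · rintro ⟨h1, -⟩
            have hbad : (s + 1) - s ≠ 1 := h1 (s + 1) rfl
            omega
          · intro hcontra; simp [hc] at hcontra
        | false =>
          rw [upIdx_cons_false (s + 1) d t hd]
          constructor
          · rintro ⟨-, h2⟩; simp [hc, h2]
          · intro h
            have h' : noAdj (d :: t) = true := by simpa [hc] using h
            refine ⟨?_, h'⟩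
            intro y hy
            have hym : y ∈ upIdx (s + 1 + 1) t := List.mem_of_mem_head? hy
            have := upIdx_ge (s + 1 + 1) t y hym
            omega

-- ===== VERDICT (by name: the statement is the Claim_ definition above) =====
theorem is_camel_case_spec : Claim_equal_is_camel_case := by
  intro name _ _
  unfold Spec_is_camel_case is_camel_case is_camel_case_alt
  cases h0 : PySem.Str.pyGet? name 0 with
  | none => rfl
  | some c0 =>
    simp only []
    split
    · rfl
    · have hidx : (PySem.List.enumerate name.toList 0).foldl
          (fun acc p => if PySem.Chars.isupper p.2 then acc ++ [p.1] else acc) [] = upIdx 0 name.toList := by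
        rw [PySem.List.foldl_append_if]
        simp [upIdx]
      rw [hidx, camelLoop_eq]
      simp only [Bool.false_and, Bool.not_false, Bool.true_and]
      have hiff : chk (upIdx 0 name.toList) = true ↔ noAdj name.toList = true :=
        (chk_iff (upIdx 0 name.toList)).trans (chain_upIdx name.toList 0)
      have : ((PySem.List.pyRange 1 (upIdx 0 name.toList).length 1).foldl
          (fun ok i => ok && !(PySem.List.pyGetD (upIdx 0 name.toList) i 0 - PySem.List.pyGetD (upIdx 0 name.toList) (i - 1) 0 == 1)) true) = chk (upIdx 0 name.toList) := rfl
      rw [this]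
      exact Bool.coe_iff_coe.mp hiff
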